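-- pv_equiv track=rewrite | github.com/Cyberpunk-San/CollabVerse | backend/app/services/skill_estimator.py | estimate_skills
-- ===== SOURCE A (Python) =====
-- def estimate_skills(features: dict) -> dict:
--     skills = {}
--
--     for tech, value in features.items():
--         if value >= 80:
--             skills[tech] = 4
--         elif value >= 50:
--             skills[tech] = 3
--         elif value >= 30:
--             skills[tech] = 2
--         else:
--             skills[tech] = 1
--
--     return skills
-- ===== SOURCE B (Python) =====
-- import bisect
--
-- _THRESHOLDS = [30, 50, 80]
-- _LEVELS = [1, 2, 3, 4]
--
-- def estimate_skills(features: dict) -> dict: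
--     return {tech: _LEVELS[bisect.bisect_right(_THRESHOLDS, value)]
--             for tech, value in features.items()}
-- ===== Notes on version B (the rewrite author's own statement) =====
-- stated objective: idiomatic
-- what changed: Replaces the sequential if/elif threshold chain with a binary-search table lookup (bisect_right over a sorted thresholds array indexing a parallel levels array) inside a dict comprehension.
import Mathlib
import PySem

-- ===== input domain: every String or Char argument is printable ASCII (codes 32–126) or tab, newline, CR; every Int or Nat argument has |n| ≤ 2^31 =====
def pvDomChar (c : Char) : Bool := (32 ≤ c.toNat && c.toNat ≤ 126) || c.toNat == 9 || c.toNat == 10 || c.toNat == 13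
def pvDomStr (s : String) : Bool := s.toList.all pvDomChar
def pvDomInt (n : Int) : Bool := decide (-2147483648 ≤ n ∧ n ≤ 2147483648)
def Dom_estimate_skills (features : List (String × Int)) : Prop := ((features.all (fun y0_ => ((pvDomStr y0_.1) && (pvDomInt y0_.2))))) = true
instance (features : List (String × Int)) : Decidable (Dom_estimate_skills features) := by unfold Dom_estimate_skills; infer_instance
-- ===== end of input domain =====

-- B replaces A's if/elif threshold chain by a bisect_right binary search over a sorted
-- thresholds table with a parallel levels array (idiomatic; same cost).

-- ===== PORT A =====
def estimate_skills (features : List (String × Int)) : List (String × Int) :=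
  (features.foldl
    (fun (skills : PySem.Dict String Int) p =>
      skills.insert p.1
        (if p.2 ≥ 80 then 4 else if p.2 ≥ 50 then 3 else if p.2 ≥ 30 then 2 else 1))
    PySem.Dict.empty).items

-- ===== PORT B =====
-- transliteration of CPython's bisect_right loop (lo/hi halving); the Nat fuel only
-- bounds the number of iterations (each step shrinks hi-lo, so a.length suffices)
def bisectGo (a : List Int) (x : Int) : Nat → Nat → Nat → Nat
  | 0, lo, _ => lo
  | f + 1, lo, hi =>
    if lo < hi then
      let mid := (lo + hi) / 2
      if x < a.getD mid 0 then bisectGo a x f lo mid else bisectGo a x f (mid + 1) hi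
    else lo

def bisectRight (a : List Int) (x : Int) : Nat := bisectGo a x a.length 0 a.length

def pvThresholds : List Int := [30, 50, 80]
def pvLevels : List Int := [1, 2, 3, 4]

def estimate_skills_alt (features : List (String × Int)) : List (String × Int) :=
  (features.foldl
    (fun (d : PySem.Dict String Int) p =>
      d.insert p.1 (pvLevels.getD (bisectRight pvThresholds p.2) 0))
    PySem.Dict.empty).items

-- ===== PRECONDITION & SPEC =====
def Spec_estimate_skills (features : List (String × Int)) (out : List (String × Int)) : Prop := out = estimate_skills_alt features
instance (features : List (String × Int)) (out : List (String × Int)) : Decidable (Spec_estimate_skills features out) := by unfold Spec_estimate_skills; infer_instance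

-- ===== CLAIM (what is proved, stated in full; the proofs are below) =====
def Claim_equal_estimate_skills : Prop := ∀ (features : List (String × Int)), Dom_estimate_skills features → Spec_estimate_skills features (estimate_skills features)

-- ===== LEMMAS AND PROOFS =====
lemma level_eq (x : Int) :
    pvLevels.getD (bisectRight pvThresholds x) 0 =
      (if x ≥ 80 then 4 else if x ≥ 50 then 3 else if x ≥ 30 then 2 else 1 : Int) := by
  simp only [bisectRight, pvThresholds, pvLevels, bisectGo, List.length_cons,
    List.length_nil, List.getD]
  norm_num
  split_ifs <;> first | rfl | omega

-- ===== VERDICT (by name: the statement is the Claim_ definition above) =====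
theorem estimate_skills_spec : Claim_equal_estimate_skills := by
  intro features _
  unfold Spec_estimate_skills estimate_skills estimate_skills_alt
  congr 1
  apply PySem.List.foldl_congr_mem
  intro d p _
  rw [level_eq]
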